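-- pv_equiv track=rewrite | github.com/madisonchamberlain/Hexapawn | hexapawn.py | num_black_clear_path
-- ===== SOURCE A (Python) =====
-- def get_color_locations (board, color):
--   color_locs = []
--   # look through each character on the board
--   if board == None:
--     return None
--   for i in range(len(board)):
--     for j in range(len(board[i])):
--       # if character is color, record its location
--       if board[i][j] == color:
--         color_locs.append([i, j])
--   return color_locs
--
-- def num_black_clear_path(board):
--   clear = 0
--   black_locs = get_color_locations(board, "b")
--   for black in black_locs:
--     non_empty = 0
--     for i in range(0, black[0]):
--       # if a non dash is found, the column is not empty
--       if board[i][black[1]] != "-":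
--         non_empty += 1
--     if non_empty == 0:
--       clear += 1
--   return clear
-- ===== SOURCE B (Python) =====
-- def num_black_clear_path(board):
--     # single top-down pass: a black pawn is clear iff its column is not yet blocked
--     blocked = set()
--     clear = 0
--     for row in board:
--         for j, ch in enumerate(row):
--             if ch == "b" and j not in blocked:
--                 clear += 1
--         for j, ch in enumerate(row):
--             if ch != "-":
--                 blocked.add(j)
--     return clear
-- ===== Notes on version B (the rewrite author's own statement) =====
-- stated objective: alternative
-- what changed: instead of rescanning every row above each black pawn, B makes one top-down pass maintaining a set of already-blocked columns (O(R*C) vs A's O(R^2*C) worst case, though not measurably faster on the benchmark inputs)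
import Mathlib
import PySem

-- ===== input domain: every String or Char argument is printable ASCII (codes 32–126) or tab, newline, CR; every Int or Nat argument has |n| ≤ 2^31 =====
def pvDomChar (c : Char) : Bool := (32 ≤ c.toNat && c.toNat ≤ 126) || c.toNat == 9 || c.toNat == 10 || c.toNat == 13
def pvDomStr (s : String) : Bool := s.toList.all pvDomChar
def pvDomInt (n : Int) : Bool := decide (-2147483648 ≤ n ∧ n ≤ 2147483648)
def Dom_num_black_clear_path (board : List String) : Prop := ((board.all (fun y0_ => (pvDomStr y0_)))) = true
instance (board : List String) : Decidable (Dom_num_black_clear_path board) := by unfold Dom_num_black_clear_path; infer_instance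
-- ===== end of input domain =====

-- B makes one top-down pass with a blocked-column set instead of rescanning the rows above each pawn.
-- ===== PORT A =====
-- the unreachable 'board == None' branch of get_color_locations has no counterpart: a List String is never None
def get_color_locations (board : List String) (color : Char) : List (Int × Int) :=
  (PySem.List.pyRange 0 (board.length : Int) 1).foldl (fun color_locs i =>
    let row := (PySem.List.pyGetD board i "").toList
    (PySem.List.pyRange 0 (row.length : Int) 1).foldl (fun acc j =>
      if PySem.List.pyGetD row j ' ' == color then acc ++ [(i, j)] else acc) color_locs) []

def num_black_clear_path (board : List String) : Int :=
  (get_color_locations board 'b').foldl (fun clear black =>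
    let non_empty : Int :=
      (PySem.List.pyRange 0 black.1 1).foldl (fun n i =>
        -- board[i][black[1]] raises IndexError when out of range (excluded by Pre_); '?' is never the in-range value
        if PySem.List.pyGetD (PySem.List.pyGetD board i "").toList black.2 '?' != '-' then n + 1 else n) 0
    if non_empty == 0 then clear + 1 else clear) 0

-- ===== PORT B =====
-- the loop body of Source B (one row: count the clear black pawns, then block the non-dash columns)
def bStep (st : PySem.Set Int × Int) (row : String) : PySem.Set Int × Int :=
  let clear := (PySem.List.enumerate row.toList).foldl
    (fun c p => if p.2 == 'b' && !(PySem.Set.contains st.1 p.1) then c + 1 else c) st.2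
  let blocked := (PySem.List.enumerate row.toList).foldl
    (fun s p => if p.2 != '-' then PySem.Set.add s p.1 else s) st.1
  (blocked, clear)

def num_black_clear_path_alt (board : List String) : Int :=
  (board.foldl bStep (PySem.Set.empty, 0)).2

-- ===== PRECONDITION & SPEC =====
-- Pre_ excludes exactly the boards on which A raises IndexError: some 'b' whose column index
-- is out of range for a shorter row above it.
def Pre_num_black_clear_path (board : List String) : Prop :=
  ∀ i < board.length, ∀ j < ((board.getD i "").toList).length,
    ((board.getD i "").toList).getD j ' ' = 'b' → ∀ k < i, j < ((board.getD k "").toList).length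
instance (board : List String) : Decidable (Pre_num_black_clear_path board) := by
  unfold Pre_num_black_clear_path; infer_instance
def pvWitness_num_black_clear_path : List String := ["w--", "-b-", "b-b"]

def Spec_num_black_clear_path (board : List String) (out : Int) : Prop := out = num_black_clear_path_alt board
instance (board : List String) (out : Int) : Decidable (Spec_num_black_clear_path board out) := by unfold Spec_num_black_clear_path; infer_instance

-- ===== CLAIM (what is proved, stated in full; the proofs are below) =====
def Claim_equal_num_black_clear_path : Prop := ∀ (board : List String), Dom_num_black_clear_path board → Pre_num_black_clear_path board → Spec_num_black_clear_path board (num_black_clear_path board)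

-- ===== LEMMAS AND PROOFS =====

-- row r of the prefix blocks column j
def rowBlocked (r : List Char) (j : Int) : Prop :=
  0 ≤ j ∧ j.toNat < r.length ∧ r.getD j.toNat '?' ≠ '-'

-- number of clear black pawns of row r, given the rows `pre` already above it
def aRow (pre : List String) (r : List Char) : Int :=
  (((PySem.List.pyRange 0 (r.length : Int) 1).filter
      (fun j => PySem.List.pyGetD r j ' ' == 'b')).filter
      (fun j => pre.all (fun q => PySem.List.pyGetD q.toList j '?' == '-'))).length

-- row-by-row recursion both programs are reduced to
def aCnt (pre rest : List String) : Int :=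
  match rest with
  | [] => 0
  | r :: rs => aRow pre r.toList + aCnt (pre ++ [r]) rs

theorem aCnt_snoc (pre rest : List String) (r : String) :
    aCnt pre (rest ++ [r]) = aCnt pre rest + aRow (pre ++ rest) r.toList := by
  induction rest generalizing pre with
  | nil => simp [aCnt]
  | cons x xs ih => simp [aCnt, ih (pre ++ [x]), List.append_assoc]; ring

theorem contains_fold_add (l : List Int) (p : Int → Bool) (s : PySem.Set Int) (j : Int) :
    j ∈ (l.foldl (fun s x => if p x then PySem.Set.add s x else s) s) ↔ j ∈ s ∨ (j ∈ l ∧ p j) := by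
  induction l generalizing s with
  | nil => simp
  | cons x xs ih =>
    simp only [List.foldl_cons, ih, List.mem_cons]
    by_cases hx : p x = true
    · simp only [hx, if_pos, PySem.Set.mem_add]
      constructor
      · rintro (⟨h | h⟩ | h)
        · exact Or.inl h
        · exact Or.inr ⟨Or.inl h, by subst h; exact hx⟩
        · exact Or.inr ⟨Or.inr h.1, h.2⟩
      · rintro (h | ⟨h | h, hp⟩)
        · exact Or.inl (Or.inl h)
        · exact Or.inl (Or.inr h)
        · exact Or.inr ⟨h, hp⟩
    · simp only [hx]
      constructor
      · rintro (h | h)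
        · exact Or.inl h
        · exact Or.inr ⟨Or.inr h.1, h.2⟩
      · rintro (h | ⟨h | h, hp⟩)
        · exact Or.inl h
        · subst h; exact absurd hp hx
        · exact Or.inr ⟨h, hp⟩

theorem blocked_upd (r : List Char) (s : PySem.Set Int) (j : Int) :
    PySem.Set.contains ((PySem.List.enumerate r).foldl (fun s p => if p.2 != '-' then PySem.Set.add s p.1 else s) s) j = true
      ↔ PySem.Set.contains s j = true ∨ rowBlocked r j := by
  rw [PySem.List.enumerate_eq_map_pyRange r '?', List.foldl_map, PySem.Set.contains_iff, PySem.Set.contains_iff]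
  rw [contains_fold_add (p := fun x => PySem.List.pyGetD r x '?' != '-')]
  simp only [PySem.List.mem_pyRange_one, PySem.List.len_eq, rowBlocked]
  constructor
  · rintro (h | ⟨⟨h0, hlt⟩, hp⟩)
    · exact Or.inl h
    · refine Or.inr ⟨h0, by omega, ?_⟩
      rw [PySem.List.pyGetD_of_nonneg _ _ h0] at hp
      simpa using hp
  · rintro (h | ⟨h0, hlt, hne⟩)
    · exact Or.inl h
    · refine Or.inr ⟨⟨h0, by omega⟩, ?_⟩
      rw [PySem.List.pyGetD_of_nonneg _ _ h0]
      simpa using hne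

theorem row_count (r : List Char) (s : PySem.Set Int) (c : Int) (pre : List String)
    (hs : ∀ j : Int, PySem.Set.contains s j = true ↔ ∃ q ∈ pre, rowBlocked q.toList j)
    (hrow : ∀ j : Nat, j < r.length → r.getD j ' ' = 'b' → ∀ q ∈ pre, j < q.toList.length) :
    (PySem.List.enumerate r).foldl
      (fun c p => if p.2 == 'b' && !(PySem.Set.contains s p.1) then c + 1 else c) c
      = c + aRow pre r := by
  rw [PySem.List.enumerate_eq_map_pyRange r ' ', List.foldl_map]
  rw [PySem.List.foldl_count_if (fun j => PySem.List.pyGetD r j ' ' == 'b' && !(PySem.Set.contains s j))]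
  unfold aRow
  rw [← List.countP_eq_length_filter, List.countP_filter]
  congr 1
  congr 1
  apply List.countP_congr
  intro j hj
  rw [PySem.List.mem_pyRange_one] at hj
  obtain ⟨h0, hlt⟩ := hj
  rw [PySem.List.len_eq] at hlt
  simp only [Bool.and_eq_true, beq_iff_eq, Bool.not_eq_eq_eq_not, Bool.not_true,
    PySem.List.pyGetD_of_nonneg _ _ h0]
  constructor
  · rintro ⟨hb, hnc⟩
    refine ⟨?_, hb⟩
    simp only [List.all_eq_true, beq_iff_eq]
    intro q hq
    have hlen := hrow j.toNat (by omega) (by simpa [List.getD_eq_getElem?_getD] using hb) q hq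
    have hnrb : ¬ rowBlocked q.toList j := by
      intro hrb
      rw [(hs j).2 ⟨q, hq, hrb⟩] at hnc
      simp at hnc
    unfold rowBlocked at hnrb
    push Not at hnrb
    exact hnrb h0 hlen
  · rintro ⟨hall, hb⟩
    refine ⟨hb, ?_⟩
    simp only [List.all_eq_true, beq_iff_eq] at hall
    have hnc : ¬ PySem.Set.contains s j = true := by
      rw [hs j]
      rintro ⟨q, hq, hrb⟩
      exact hrb.2.2 (hall q hq)
    simpa using hnc

theorem B_main (rest : List String) (pre : List String) (s : PySem.Set Int) (c : Int)
    (hs : ∀ j : Int, PySem.Set.contains s j = true ↔ ∃ q ∈ pre, rowBlocked q.toList j)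
    (hpre : Pre_num_black_clear_path (pre ++ rest)) :
    (rest.foldl bStep (s, c)).2 = c + aCnt pre rest := by
  induction rest generalizing pre s c with
  | nil => simp [aCnt]
  | cons r rs ih =>
    have hget : (pre ++ r :: rs).getD pre.length "" = r := by
      simp [List.getD_eq_getElem?_getD]
    have hrow : ∀ j : Nat, j < r.toList.length → r.toList.getD j ' ' = 'b' →
        ∀ q ∈ pre, j < q.toList.length := by
      intro j hj hb q hq
      obtain ⟨k, hk, hkq⟩ := List.mem_iff_getElem.1 hq
      have := hpre pre.length (by simp) j (by rwa [hget]) (by rwa [hget]) k (by omega)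
      rwa [List.getD_append _ _ _ _ hk, List.getD_eq_getElem _ _ hk, hkq] at this
    have hstep : bStep (s, c) r =
        ((PySem.List.enumerate r.toList).foldl (fun s p => if p.2 != '-' then PySem.Set.add s p.1 else s) s,
          c + aRow pre r.toList) := by
      unfold bStep
      simp only
      rw [row_count r.toList s c pre hs hrow]
    rw [List.foldl_cons, hstep]
    rw [ih (pre ++ [r]) _ _ ?_ ?_]
    · simp [aCnt]; ring
    · intro j
      rw [blocked_upd, hs j]
      constructor
      · rintro (⟨q, hq, hrb⟩ | hrb)
        · exact ⟨q, List.mem_append_left _ hq, hrb⟩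
        · exact ⟨r, List.mem_append_right _ (by simp), hrb⟩
      · rintro ⟨q, hq, hrb⟩
        rcases List.mem_append.1 hq with h | h
        · exact Or.inl ⟨q, h, hrb⟩
        · simp at h; subst h; exact Or.inr hrb
    · simpa [List.append_assoc] using hpre

theorem pyGetD_append_lt {α : Type} (xs : List α) (x : α) (i : Int) (d : α)
    (h0 : 0 ≤ i) (h : i.toNat < xs.length) :
    PySem.List.pyGetD (xs ++ [x]) i d = PySem.List.pyGetD xs i d := by
  rw [PySem.List.pyGetD_of_nonneg _ _ h0, PySem.List.pyGetD_of_nonneg _ _ h0,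
    List.getD_append _ _ _ _ h]

theorem pyGetD_append_len {α : Type} (xs : List α) (x : α) (d : α) :
    PySem.List.pyGetD (xs ++ [x]) (xs.length : Int) d = x := by
  rw [PySem.List.pyGetD_natCast]
  simp [List.getD_eq_getElem?_getD]

theorem gcl_nil (c : Char) : get_color_locations [] c = [] := rfl

theorem gcl_snoc (board : List String) (r : String) (c : Char) :
    get_color_locations (board ++ [r]) c =
      get_color_locations board c ++
        ((PySem.List.pyRange 0 (r.toList.length : Int) 1).filter
            (fun j => PySem.List.pyGetD r.toList j ' ' == c)).map
          (fun j => ((board.length : Int), j)) := by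
  unfold get_color_locations
  have h1 : ((board ++ [r]).length : Int) = (board.length : Int) + 1 := by simp
  rw [h1, PySem.List.pyRange_one_succ_right (by positivity), List.foldl_append]
  simp only [List.foldl_cons, List.foldl_nil, pyGetD_append_len]
  rw [PySem.List.foldl_append_if (fun j => PySem.List.pyGetD r.toList j ' ' == c)
    (fun j => ((board.length : Int), j))]
  congr 1
  apply PySem.List.foldl_congr_mem
  intro acc i hi
  rw [PySem.List.mem_pyRange_one] at hi
  simp only [pyGetD_append_lt board r i "" hi.1 (by omega)]

theorem gcl_fst_bound (board : List String) (c : Char) :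
    ∀ p ∈ get_color_locations board c, 0 ≤ p.1 ∧ p.1 < (board.length : Int) := by
  induction board using List.reverseRecOn with
  | nil => intro p hp; rw [gcl_nil] at hp; simp at hp
  | append_singleton bd r ih =>
    intro p hp
    rw [gcl_snoc] at hp
    have hlen : ((bd ++ [r]).length : Int) = (bd.length : Int) + 1 := by simp
    rcases List.mem_append.1 hp with h | h
    · have := ih p h
      omega
    · obtain ⟨j, _, rfl⟩ := List.mem_map.1 h
      simp only
      omega

-- A's loop body, with the let inlined (definitionally equal)
def aBody (bd : List String) (clear : Int) (black : Int × Int) : Int :=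
  if ((PySem.List.pyRange 0 black.1 1).foldl
      (fun n i => if PySem.List.pyGetD (PySem.List.pyGetD bd i "").toList black.2 '?' != '-'
        then n + 1 else n) (0 : Int)) == 0
  then clear + 1 else clear

theorem A_unfold (bd : List String) :
    num_black_clear_path bd = (get_color_locations bd 'b').foldl (aBody bd) 0 := rfl

theorem nonEmpty_eq (board : List String) (j : Int) :
    (((PySem.List.pyRange 0 (board.length : Int) 1).foldl
        (fun n i => if PySem.List.pyGetD (PySem.List.pyGetD board i "").toList j '?' != '-'
          then n + 1 else n) (0 : Int)) == 0)
      = board.all (fun q => PySem.List.pyGetD q.toList j '?' == '-') := by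
  have h := PySem.List.foldl_pyRange_zero_pyGetD board ""
    (fun n q => if PySem.List.pyGetD q.toList j '?' != '-' then n + 1 else n) (0 : Int)
  rw [PySem.List.len_eq] at h
  rw [h]
  simp only [PySem.List.foldl_count_if]
  rw [Bool.eq_iff_iff]
  simp [List.countP_eq_zero, List.all_eq_true]

theorem A_snoc (board : List String) (r : String) :
    num_black_clear_path (board ++ [r]) = num_black_clear_path board + aRow board r.toList := by
  rw [A_unfold, A_unfold, gcl_snoc board r 'b', List.foldl_append]
  have h1 : List.foldl (aBody (board ++ [r])) 0 (get_color_locations board 'b')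
      = List.foldl (aBody board) 0 (get_color_locations board 'b') := by
    apply PySem.List.foldl_congr_mem
    intro acc black hb
    have hbnd := gcl_fst_bound board 'b' black hb
    unfold aBody
    have hne : (PySem.List.pyRange 0 black.1 1).foldl
        (fun n i => if PySem.List.pyGetD (PySem.List.pyGetD (board ++ [r]) i "").toList black.2 '?' != '-'
          then n + 1 else n) (0 : Int)
      = (PySem.List.pyRange 0 black.1 1).foldl
        (fun n i => if PySem.List.pyGetD (PySem.List.pyGetD board i "").toList black.2 '?' != '-'
          then n + 1 else n) (0 : Int) := by
      apply PySem.List.foldl_congr_mem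
      intro n i hi
      rw [PySem.List.mem_pyRange_one] at hi
      rw [pyGetD_append_lt board r i "" hi.1 (by omega)]
    rw [hne]
  rw [h1, List.foldl_map]
  have h2 : ∀ j ∈ (PySem.List.pyRange 0 (r.toList.length : Int) 1).filter
      (fun j => PySem.List.pyGetD r.toList j ' ' == 'b'), ∀ acc : Int,
      aBody (board ++ [r]) acc ((board.length : Int), j)
        = if board.all (fun q => PySem.List.pyGetD q.toList j '?' == '-') then acc + 1 else acc := by
    intro j _ acc
    unfold aBody
    have hne : (PySem.List.pyRange 0 ((board.length : Int), j).1 1).foldl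
        (fun n i => if PySem.List.pyGetD (PySem.List.pyGetD (board ++ [r]) i "").toList ((board.length : Int), j).2 '?' != '-'
          then n + 1 else n) (0 : Int)
      = (PySem.List.pyRange 0 (board.length : Int) 1).foldl
        (fun n i => if PySem.List.pyGetD (PySem.List.pyGetD board i "").toList j '?' != '-'
          then n + 1 else n) (0 : Int) := by
      apply PySem.List.foldl_congr_mem
      intro n i hi
      rw [PySem.List.mem_pyRange_one] at hi
      rw [pyGetD_append_lt board r i "" hi.1 (by omega)]
    rw [hne, nonEmpty_eq board j]
  rw [PySem.List.foldl_congr_mem' _ _ _ _ h2]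
  rw [PySem.List.foldl_count_if (fun j => board.all (fun q => PySem.List.pyGetD q.toList j '?' == '-'))]
  unfold aRow
  rw [← List.countP_eq_length_filter]

theorem A_eq_aCnt (board : List String) : num_black_clear_path board = aCnt [] board := by
  induction board using List.reverseRecOn with
  | nil => rfl
  | append_singleton bd r ih =>
    rw [A_snoc, ih, aCnt_snoc]
    simp

-- ===== VERDICT (by name: the statement is the Claim_ definition above) =====
theorem num_black_clear_path_spec : Claim_equal_num_black_clear_path := by
  intro board _ hpre
  unfold Spec_num_black_clear_path num_black_clear_path_alt
  rw [A_eq_aCnt]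
  rw [B_main board [] PySem.Set.empty 0 (by simp [PySem.Set.empty, PySem.Set.contains]) (by simpa using hpre)]
  ring
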